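-- pv_equiv track=rewrite | github.com/MateoAngulo/Ensamblador | RiscV/main.py | takeJumpAwayArray
-- ===== SOURCE A (Python) =====
-- def takeJumpAway(string):
--     newString=string.replace("\n","") # Reemplaza los saltos de línea por una cadena vacía
--     return newString
--
-- def takeJumpAwayArray(list):
--     l1=[] # Nueva lista para almacenar las cadenas sin saltos de línea
--     count=0
--     tam=len(list)
--     for word in list:
--         count+=1
--         if (count == tam): # Si es el último elemento de la lista, se le quitan los saltos de línea
--             l1.append(takeJumpAway(word))
--         else:
--             l1.append(word) # Se agrega tal cual si no es el último
--     return l1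
-- ===== SOURCE B (Python) =====
-- def takeJumpAwayArray(list):
--     if not list:
--         return []
--     return list[:-1] + [list[-1].replace("\n", "")]
-- ===== Notes on version B (the rewrite author's own statement) =====
-- stated objective: simpler
-- what changed: Replaces the counter-driven loop that tests every element for being last with an empty-list guard plus slicing: an unmodified copy of all-but-last concatenated with the newline-stripped last element.
import Mathlib
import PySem

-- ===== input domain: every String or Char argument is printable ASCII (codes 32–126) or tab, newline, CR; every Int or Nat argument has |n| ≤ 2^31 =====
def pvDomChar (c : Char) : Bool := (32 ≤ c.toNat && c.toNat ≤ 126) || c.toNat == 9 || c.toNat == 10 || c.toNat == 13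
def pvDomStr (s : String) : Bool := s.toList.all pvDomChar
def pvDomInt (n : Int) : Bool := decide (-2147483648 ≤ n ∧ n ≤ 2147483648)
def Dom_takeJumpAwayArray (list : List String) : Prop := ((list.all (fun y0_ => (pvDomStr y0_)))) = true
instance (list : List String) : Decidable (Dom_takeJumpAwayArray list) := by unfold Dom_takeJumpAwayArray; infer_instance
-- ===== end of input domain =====

-- B replaces A's counter-driven loop (branching on "is this the last element?") with an
-- empty-list guard plus two slices: all-but-last copied unchanged, last newline-stripped. Objective: simpler.


-- ===== PORT A =====
def takeJumpAway (string : String) : String :=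
  PySem.Str.replace string "\n" ""

def takeJumpAwayArray (list : List String) : List String :=
  -- l1 = [], count = 0, tam = len(list); for word in list: …
  (list.foldl
    (fun (st : List String × Nat) word =>
      let count := st.2 + 1
      if count = list.length then (st.1 ++ [takeJumpAway word], count)
      else (st.1 ++ [word], count))
    ([], 0)).1

-- ===== PORT B =====
def takeJumpAwayArray_alt (list : List String) : List String :=
  match PySem.List.pyGet? list (-1) with
  | none => []  -- empty list
  | some last => PySem.List.slice list none (some (-1)) ++ [PySem.Str.replace last "\n" ""]

-- ===== PRECONDITION & SPEC =====
def Spec_takeJumpAwayArray (list : List String) (out : List String) : Prop := out = takeJumpAwayArray_alt list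
instance (list : List String) (out : List String) : Decidable (Spec_takeJumpAwayArray list out) := by unfold Spec_takeJumpAwayArray; infer_instance

-- ===== CLAIM (what is proved, stated in full; the proofs are below) =====
def Claim_equal_takeJumpAwayArray : Prop := ∀ (list : List String), Dom_takeJumpAwayArray list → Spec_takeJumpAwayArray list (takeJumpAwayArray list)

-- ===== LEMMAS AND PROOFS =====

-- the last-element transform in closed form
def pvTail (xs : List String) : List String :=
  match xs.getLast? with
  | none => []
  | some last => xs.dropLast ++ [takeJumpAway last]

-- A's loop invariant: starting from (acc, c) with c + rest.length = tam, the fold appends pvTail rest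
theorem pvFold_inv (tam : Nat) (rest : List String) :
    ∀ (acc : List String) (c : Nat), c + rest.length = tam →
    (rest.foldl
      (fun (st : List String × Nat) word =>
        let count := st.2 + 1
        if count = tam then (st.1 ++ [takeJumpAway word], count)
        else (st.1 ++ [word], count))
      (acc, c)).1 = acc ++ pvTail rest := by
  induction rest with
  | nil => intro acc c h; simp [pvTail]
  | cons w ws ih =>
    intro acc c h
    simp only [List.foldl_cons]
    cases ws with
    | nil =>
      have hc : c + 1 = tam := by simpa using h
      simp [hc, pvTail]
    | cons y ys =>
      have hc : ¬ (c + 1 = tam) := by simp at h; omega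
      simp only [hc, if_false]
      rw [ih (acc ++ [w]) (c + 1) (by simp at h ⊢; omega)]
      simp only [pvTail, List.getLast?_cons_cons, List.dropLast_cons₂, List.append_assoc,
        List.cons_append, List.nil_append]
      cases hlast : (y :: ys).getLast? with
      | none => simp at hlast
      | some l => simp

theorem alt_eq_pvTail (xs : List String) : takeJumpAwayArray_alt xs = pvTail xs := by
  unfold takeJumpAwayArray_alt pvTail
  rw [PySem.List.pyGet?_neg_one, PySem.List.slice_to_neg_one]
  rfl

-- ===== VERDICT (by name: the statement is the Claim_ definition above) =====
theorem takeJumpAwayArray_spec : Claim_equal_takeJumpAwayArray := by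
  intro list _
  unfold Spec_takeJumpAwayArray takeJumpAwayArray
  rw [alt_eq_pvTail, pvFold_inv list.length list [] 0 (by simp)]
  simp
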